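-- pv_equiv track=rewrite | github.com/andsanv/f1_season_simulator | calculator/main.py | operator_in_string
-- ===== SOURCE A (Python) =====
-- def operator_in_string(list):  # checks whether there are still operations in the list
--     for op in "+-*/v^":
--         try:
--             list.index(op)
--         except ValueError:
--             pass
--         else:
--             return True
--
--     return False
-- ===== SOURCE B (Python) =====
-- OPS = {"+", "-", "*", "/", "v", "^"}
--
-- def operator_in_string(list):  # checks whether there are still operations in the list
--     return any(x in OPS for x in list)
-- ===== Notes on version B (the rewrite author's own statement) =====
-- stated objective: idiomatic
-- what changed: B makes a single pass over the input testing membership in a precomputed set of the six operator strings, instead of A's loop over the six operators each re-scanning the whole list with list.index inside try/except.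
import Mathlib
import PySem

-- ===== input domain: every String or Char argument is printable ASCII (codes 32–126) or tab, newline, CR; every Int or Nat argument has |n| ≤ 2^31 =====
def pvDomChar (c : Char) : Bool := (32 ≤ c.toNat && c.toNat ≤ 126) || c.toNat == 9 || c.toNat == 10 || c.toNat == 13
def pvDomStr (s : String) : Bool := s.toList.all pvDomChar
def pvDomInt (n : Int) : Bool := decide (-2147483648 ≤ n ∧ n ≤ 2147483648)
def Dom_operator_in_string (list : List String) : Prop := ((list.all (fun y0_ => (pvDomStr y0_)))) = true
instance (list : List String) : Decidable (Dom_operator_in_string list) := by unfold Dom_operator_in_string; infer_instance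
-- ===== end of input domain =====

-- B replaces A's loop over the six operators (each re-scanning the list with list.index)
-- by one pass over the list testing membership in a precomputed operator set (objective: idiomatic).

-- ===== PORT A =====
-- for op in "+-*/v^": list.index(op) succeeds → return True; after the loop → False.
def operator_in_string (list : List String) : Bool :=
  ["+", "-", "*", "/", "v", "^"].foldl
    (fun acc op => acc || (PySem.List.index? list op).isSome) false

-- ===== PORT B =====
-- OPS = {"+","-","*","/","v","^"}; return any(x in OPS for x in list)
def pvOPS : PySem.Set String := PySem.Set.ofList ["+", "-", "*", "/", "v", "^"]

def operator_in_string_alt (list : List String) : Bool :=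
  list.any (fun x => PySem.Set.contains pvOPS x)

-- ===== PRECONDITION & SPEC =====
def Spec_operator_in_string (list : List String) (out : Bool) : Prop := out = operator_in_string_alt list
instance (list : List String) (out : Bool) : Decidable (Spec_operator_in_string list out) := by unfold Spec_operator_in_string; infer_instance

-- ===== CLAIM (what is proved, stated in full; the proofs are below) =====
def Claim_equal_operator_in_string : Prop := ∀ (list : List String), Dom_operator_in_string list → Spec_operator_in_string list (operator_in_string list)

-- ===== LEMMAS AND PROOFS =====
theorem operator_in_string_eq_alt (l : List String) :
    operator_in_string l = operator_in_string_alt l := by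
  rw [Bool.eq_iff_iff]
  simp only [operator_in_string, operator_in_string_alt, List.foldl, Bool.or_eq_true,
    Bool.false_or, PySem.List.index?_isSome_iff, List.any_eq_true]
  constructor
  · rintro (((((h|h)|h)|h)|h)|h) <;> exact ⟨_, h, by decide⟩
  · rintro ⟨x, hx, h⟩
    have hm : x ∈ (["+", "-", "*", "/", "v", "^"] : List String) := by
      simpa [pvOPS, PySem.Set.contains, PySem.Set.ofList] using h
    simp only [List.mem_cons, List.not_mem_nil] at hm
    rcases hm with rfl|rfl|rfl|rfl|rfl|rfl|⟨⟩ <;> simp_all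

-- ===== VERDICT (by name: the statement is the Claim_ definition above) =====
theorem operator_in_string_spec : Claim_equal_operator_in_string := by
  intro list _
  exact operator_in_string_eq_alt list
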